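-- pv_equiv track=rewrite | github.com/jpassgo/python-practice | leet_code/unique_chars.py | countUniqueChars
-- ===== SOURCE A (Python) =====
-- def countUniqueChars(s: str) -> int:
--     char_set = set()
--     for c in s:
--         char_set.add(c)
--
--     i = len(char_set)
--     sum = i
--     while i > 0:
--         sum += (i - 1) ** 2
--         i -= 1
--
--     return sum
-- ===== SOURCE B (Python) =====
-- def countUniqueChars(s: str) -> int:
--     n = len(set(s))
--     return n + (n - 1) * n * (2 * n - 1) // 6
-- ===== Notes on version B (the rewrite author's own statement) =====
-- stated objective: simpler
-- what changed: Replaces the decrementing while loop that accumulates (i-1)**2 with the closed-form sum-of-squares formula n + (n-1)*n*(2n-1)//6 over the distinct-character count.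
import Mathlib
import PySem

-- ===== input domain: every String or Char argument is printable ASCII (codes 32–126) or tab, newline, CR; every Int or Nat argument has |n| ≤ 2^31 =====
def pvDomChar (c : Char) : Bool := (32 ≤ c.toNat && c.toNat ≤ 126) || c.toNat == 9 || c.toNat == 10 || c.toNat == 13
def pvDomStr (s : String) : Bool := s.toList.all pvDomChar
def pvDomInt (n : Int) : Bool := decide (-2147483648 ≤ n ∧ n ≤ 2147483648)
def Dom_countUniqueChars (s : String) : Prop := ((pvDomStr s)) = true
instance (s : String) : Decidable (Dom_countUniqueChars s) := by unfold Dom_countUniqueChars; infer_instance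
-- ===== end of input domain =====

-- B replaces A's decrementing square-summing while loop by the closed-form formula
-- n + (n-1)*n*(2n-1)//6 over the distinct-character count (objective: simpler).

-- ===== PORT A =====
-- the while loop: while i > 0: sum += (i-1)**2; i -= 1
def countUniqueCharsLoop : Nat → Int → Int
  | 0, acc => acc
  | Nat.succ k, acc => countUniqueCharsLoop k (acc + ((Nat.succ k : Int) - 1) ^ 2)

def countUniqueChars (s : String) : Int :=
  let charSet : PySem.Set Char := s.toList.foldl PySem.Set.add PySem.Set.empty
  let i : Nat := charSet.length
  countUniqueCharsLoop i (i : Int)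

-- ===== PORT B =====
def countUniqueChars_alt (s : String) : Int :=
  let n : Int := (PySem.Set.ofList s.toList).length
  n + PySem.Int.floordiv ((n - 1) * n * (2 * n - 1)) 6

-- ===== PRECONDITION & SPEC =====
def Spec_countUniqueChars (s : String) (out : Int) : Prop := out = countUniqueChars_alt s
instance (s : String) (out : Int) : Decidable (Spec_countUniqueChars s out) := by unfold Spec_countUniqueChars; infer_instance

-- ===== CLAIM (what is proved, stated in full; the proofs are below) =====
def Claim_equal_countUniqueChars : Prop := ∀ (s : String), Dom_countUniqueChars s → Spec_countUniqueChars s (countUniqueChars s)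

-- ===== LEMMAS AND PROOFS =====

theorem countUniqueCharsLoop_shift (k : Nat) (a b : Int) :
    countUniqueCharsLoop k (a + b) = countUniqueCharsLoop k a + b := by
  induction k generalizing a with
  | zero => rfl
  | succ m ih =>
      simp only [countUniqueCharsLoop]
      rw [show a + b + ((Nat.succ m : Int) - 1) ^ 2
            = (a + ((Nat.succ m : Int) - 1) ^ 2) + b by ring, ih]

theorem countUniqueCharsLoop_closed (k : Nat) :
    countUniqueCharsLoop k 0 * 6 = ((k : Int) - 1) * k * (2 * k - 1) := by
  induction k with
  | zero => decide
  | succ m ih =>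
      simp only [countUniqueCharsLoop]
      rw [show (0 : Int) + ((Nat.succ m : Int) - 1) ^ 2 = 0 + ((m : Int)) ^ 2 by push_cast; ring]
      rw [countUniqueCharsLoop_shift m 0 ((m : Int) ^ 2), add_mul, ih]
      push_cast; ring

theorem countUniqueChars_eq_closed (n : Nat) :
    countUniqueCharsLoop n (n : Int)
      = (n : Int) + PySem.Int.floordiv (((n : Int) - 1) * n * (2 * n - 1)) 6 := by
  have hshift := countUniqueCharsLoop_shift n 0 (n : Int)
  rw [zero_add] at hshift
  rw [hshift, ← countUniqueCharsLoop_closed n]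
  rw [show countUniqueCharsLoop n 0 * 6 = 6 * countUniqueCharsLoop n 0 by ring]
  rw [PySem.Int.floordiv_eq_ediv_of_pos (by norm_num)]
  rw [Int.mul_ediv_cancel_left _ (by norm_num)]
  ring

-- ===== VERDICT (by name: the statement is the Claim_ definition above) =====
theorem countUniqueChars_spec : Claim_equal_countUniqueChars := by
  intro s _
  show countUniqueChars s = countUniqueChars_alt s
  unfold countUniqueChars countUniqueChars_alt
  rw [show PySem.Set.ofList s.toList = s.toList.foldl PySem.Set.add PySem.Set.empty from
        PySem.Set.ofList_eq_foldl s.toList]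
  exact countUniqueChars_eq_closed _
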